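-- pv_equiv track=rewrite | github.com/DarshilPatel99/Sum_of_3_Palindromes | functions.py | remove_0
-- ===== SOURCE A (Python) =====
-- def remove_0(n):
--     l = len(n)
--     for i in range(l-1,-1,-1):
--         if n[i]==0:
--             n.pop(i)
--         else:
--             return n
--     return [0]
-- ===== SOURCE B (Python) =====
-- def remove_0(n):
--     last = -1
--     for i, d in enumerate(n):
--         if d != 0:
--             last = i
--     if last == -1:
--         n.clear()
--         return [0]
--     del n[last + 1:]
--     return n
-- ===== Notes on version B (the rewrite author's own statement) =====
-- stated objective: alternative
-- what changed: Replaces A's backward pop-and-early-return loop with a forward enumerate pass recording the last non-zero index followed by a single slice truncation (del n[last+1:]).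
import Mathlib
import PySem

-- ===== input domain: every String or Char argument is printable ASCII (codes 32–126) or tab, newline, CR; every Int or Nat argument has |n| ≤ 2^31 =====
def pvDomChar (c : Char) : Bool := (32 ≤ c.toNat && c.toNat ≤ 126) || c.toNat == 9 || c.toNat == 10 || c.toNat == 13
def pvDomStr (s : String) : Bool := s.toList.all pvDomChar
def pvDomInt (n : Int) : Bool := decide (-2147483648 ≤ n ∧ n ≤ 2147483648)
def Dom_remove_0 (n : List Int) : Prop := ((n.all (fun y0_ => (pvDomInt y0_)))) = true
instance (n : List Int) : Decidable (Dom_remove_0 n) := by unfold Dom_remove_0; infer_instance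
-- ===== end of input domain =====

-- B truncates with one slice after a forward last-nonzero scan instead of A's backward pop loop;
-- equivalence is about the RETURN value (both Pythons also mutate n in place, identically).

-- ===== PORT A =====
-- the loop 'for i in range(l-1,-1,-1)': i+1 remaining iterations, current index i;
-- n.pop(i) is eraseIdx (the index is in range whenever the branch fires)
def remove0Go (n : List Int) : Nat → List Int
  | 0 => [0]
  | i + 1 =>
    if PySem.List.pyGet? n (i : Int) = some 0 then
      remove0Go (n.eraseIdx i) i
    else n

def remove_0 (n : List Int) : List Int := remove0Go n n.length

-- ===== PORT B =====
-- 'last': index of the last non-zero digit, -1 if none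
def lastNZ (n : List Int) : Int :=
  (PySem.List.enumerate n 0).foldl (fun acc p => if p.2 ≠ 0 then p.1 else acc) (-1)

def remove_0_alt (n : List Int) : List Int :=
  let last := lastNZ n
  if last = -1 then [0]
  else PySem.List.slice n none (some (last + 1))

-- ===== PRECONDITION & SPEC =====
def Spec_remove_0 (n : List Int) (out : List Int) : Prop := out = remove_0_alt n
instance (n : List Int) (out : List Int) : Decidable (Spec_remove_0 n out) := by unfold Spec_remove_0; infer_instance

-- ===== CLAIM (what is proved, stated in full; the proofs are below) =====
def Claim_equal_remove_0 : Prop := ∀ (n : List Int), Dom_remove_0 n → Spec_remove_0 n (remove_0 n)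

-- ===== LEMMAS AND PROOFS =====

-- reference value: n with trailing zeros stripped, or [0] if nothing remains
def stripRef (n : List Int) : List Int :=
  let r := n.reverse.dropWhile (fun x => x == 0)
  if r.isEmpty then [0] else r.reverse

theorem stripRef_concat_zero (n : List Int) : stripRef (n ++ [0]) = stripRef n := by
  simp [stripRef]

theorem stripRef_concat_ne (n : List Int) (x : Int) (hx : x ≠ 0) :
    stripRef (n ++ [x]) = n ++ [x] := by
  simp [stripRef, hx]

theorem remove_0_concat_zero (n : List Int) : remove_0 (n ++ [0]) = remove_0 n := by
  have hlen : (n ++ [0]).length = n.length + 1 := by simp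
  have hget : PySem.List.pyGet? (n ++ [0]) (n.length : Int) = some 0 := by
    rw [PySem.List.pyGet?_natCast]
    simp
  have herase : (n ++ [0]).eraseIdx n.length = n := by
    simp [List.eraseIdx_eq_take_drop_succ]
  simp [remove_0, hlen, remove0Go, herase]

theorem remove_0_concat_ne (n : List Int) (x : Int) (hx : x ≠ 0) :
    remove_0 (n ++ [x]) = n ++ [x] := by
  have hlen : (n ++ [x]).length = n.length + 1 := by simp
  have hget : PySem.List.pyGet? (n ++ [x]) (n.length : Int) = some x := by
    rw [PySem.List.pyGet?_natCast]
    simp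
  simp [remove_0, hlen, remove0Go, hx]

theorem remove_0_eq_stripRef (n : List Int) : remove_0 n = stripRef n := by
  induction n using List.reverseRecOn with
  | nil => decide
  | append_singleton m x ih =>
    by_cases hx : x = 0
    · subst hx
      rw [remove_0_concat_zero, stripRef_concat_zero, ih]
    · rw [remove_0_concat_ne m x hx, stripRef_concat_ne m x hx]

theorem lastNZ_concat (n : List Int) (x : Int) :
    lastNZ (n ++ [x]) = if x ≠ 0 then (n.length : Int) else lastNZ n := by
  simp [lastNZ, PySem.List.enumerate_append, List.foldl_append, PySem.List.enumerate]

-- combined invariant for B, proved by reverse induction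
theorem alt_invariant (n : List Int) :
    (-1 ≤ lastNZ n ∧ lastNZ n < (n.length : Int)) ∧ remove_0_alt n = stripRef n := by
  induction n using List.reverseRecOn with
  | nil => refine ⟨⟨by decide, by decide⟩, by decide⟩
  | append_singleton m x ih =>
    obtain ⟨⟨hlo, hhi⟩, heq⟩ := ih
    by_cases hx : x = 0
    · subst hx
      have hL : lastNZ (m ++ [0]) = lastNZ m := by simp [lastNZ_concat]
      refine ⟨⟨by rw [hL]; exact hlo, by rw [hL]; simp; omega⟩, ?_⟩
      rw [stripRef_concat_zero, ← heq]
      by_cases hneg : lastNZ m = -1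
      · simp [remove_0_alt, hL, hneg]
      · have h0 : 0 ≤ lastNZ m + 1 := by omega
        have hle : (lastNZ m + 1).toNat ≤ m.length := by omega
        simp only [remove_0_alt, hL, if_neg hneg]
        rw [PySem.List.slice_to _ h0, PySem.List.slice_to _ h0,
          List.take_append_of_le_length hle]
    · have hL : lastNZ (m ++ [x]) = (m.length : Int) := by simp [lastNZ_concat, hx]
      refine ⟨⟨by rw [hL]; omega, by rw [hL]; simp⟩, ?_⟩
      have hne : (m.length : Int) ≠ -1 := by omega
      rw [stripRef_concat_ne m x hx]
      simp only [remove_0_alt, hL, if_neg hne]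
      rw [PySem.List.slice_to _ (by omega)]
      have : ((m.length : Int) + 1).toNat = m.length + 1 := by omega
      rw [this]
      simp [List.take_of_length_le]

-- ===== VERDICT (by name: the statement is the Claim_ definition above) =====
theorem remove_0_spec : Claim_equal_remove_0 := by
  intro n _
  unfold Spec_remove_0
  rw [remove_0_eq_stripRef, (alt_invariant n).2]
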